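-- pv_equiv track=rewrite | github.com/NarMadat/classic-battleship-game | src/utils.py | validate_ship_shape
-- ===== SOURCE A (Python) =====
-- BOARD_SIZE = 10
--
-- def in_bounds(r: int, c: int) -> bool:
--     return 0 <= r < BOARD_SIZE and 0 <= c < BOARD_SIZE
--
-- def validate_ship_shape(coords, size: int) -> bool:
--     if len(coords) != size:
--         return False
--
--     if len(set(coords)) != size:
--         return False
--
--     rows = [r for r, _ in coords]
--     cols = [c for _, c in coords]
--
--     same_row = len(set(rows)) == 1
--     same_col = len(set(cols)) == 1
--
--     if not (same_row or same_col):
--         return False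
--
--     if same_row:
--         r = rows[0]
--         sorted_cols = sorted(cols)
--         for i in range(1, len(sorted_cols)):
--             if sorted_cols[i] - sorted_cols[i-1] != 1:
--                 return False
--
--         return all(in_bounds(r, c) for c in sorted_cols)
--
--     if same_col:
--         c = cols[0]
--         sorted_rows = sorted(rows)
--         for i in range(1, len(sorted_rows)):
--             if sorted_rows[i] - sorted_rows[i-1] != 1:
--                 return False
--         return all(in_bounds(r, c) for r in sorted_rows)
--
--     return False
-- ===== SOURCE B (Python) =====
-- BOARD_SIZE = 10
--
-- def in_bounds(r: int, c: int) -> bool: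
--     return 0 <= r < BOARD_SIZE and 0 <= c < BOARD_SIZE
--
-- def validate_ship_shape(coords, size: int) -> bool:
--     # Same guards as the task demands; contiguity tested in closed form (no sort):
--     # distinct collinear cells are contiguous iff max - min == size - 1.
--     if len(coords) != size:
--         return False
--     if len(set(coords)) != size:
--         return False
--     rows = [r for r, _ in coords]
--     cols = [c for _, c in coords]
--     if len(set(rows)) == 1:
--         lo, hi = min(cols), max(cols)
--         return hi - lo == size - 1 and in_bounds(rows[0], lo) and in_bounds(rows[0], hi)
--     if len(set(cols)) == 1:
--         lo, hi = min(rows), max(rows)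
--         return hi - lo == size - 1 and in_bounds(lo, cols[0]) and in_bounds(hi, cols[0])
--     return False
-- ===== Notes on version B (the rewrite author's own statement) =====
-- stated objective: simpler
-- what changed: Replaces the sort-then-scan contiguity check with a closed-form test: distinct collinear cells are contiguous iff max-min == size-1, and only the two endpoint cells are bounds-checked.
import Mathlib
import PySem

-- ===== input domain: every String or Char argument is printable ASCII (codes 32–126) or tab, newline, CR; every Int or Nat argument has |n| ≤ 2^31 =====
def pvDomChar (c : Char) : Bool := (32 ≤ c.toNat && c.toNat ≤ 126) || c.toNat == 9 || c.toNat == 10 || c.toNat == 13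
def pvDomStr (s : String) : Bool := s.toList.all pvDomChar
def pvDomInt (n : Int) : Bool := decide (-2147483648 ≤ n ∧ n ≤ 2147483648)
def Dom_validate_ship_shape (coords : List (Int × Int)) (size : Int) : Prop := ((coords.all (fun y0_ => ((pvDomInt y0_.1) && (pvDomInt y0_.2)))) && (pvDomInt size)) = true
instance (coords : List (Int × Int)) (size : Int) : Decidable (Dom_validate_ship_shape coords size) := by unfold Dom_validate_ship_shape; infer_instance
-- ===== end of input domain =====

-- B replaces A's sort-then-scan contiguity check by the closed form max-min == size-1
-- (distinct collinear cells) and bounds-checks only the two endpoints; return values agree on all inputs.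

-- ===== PORT A =====
def in_bounds (r c : Int) : Bool := decide (0 ≤ r ∧ r < 10) && decide (0 ≤ c ∧ c < 10)

def validate_ship_shape (coords : List (Int × Int)) (size : Int) : Bool :=
  if (coords.length : Int) ≠ size then false
  else if ((PySem.Set.ofList coords).length : Int) ≠ size then false
  else
    let rows := coords.map (fun p => p.1)
    let cols := coords.map (fun p => p.2)
    let same_row := (PySem.Set.ofList rows).length == 1
    let same_col := (PySem.Set.ofList cols).length == 1
    if !(same_row || same_col) then false
    else if same_row then
      match PySem.List.pyGet? rows 0 with   -- rows[0]; none unreachable (same_row ⇒ rows ≠ [])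
      | none => false
      | some r =>
        let sorted_cols := PySem.List.sorted cols (fun x => x) false
        ((PySem.List.pyRange 1 (sorted_cols.length : Int)).all fun i =>
            PySem.List.pyGetD sorted_cols i 0 - PySem.List.pyGetD sorted_cols (i-1) 0 == 1)
        && sorted_cols.all (fun c => in_bounds r c)
    else if same_col then
      match PySem.List.pyGet? cols 0 with   -- cols[0]; none unreachable
      | none => false
      | some c =>
        let sorted_rows := PySem.List.sorted rows (fun x => x) false
        ((PySem.List.pyRange 1 (sorted_rows.length : Int)).all fun i =>
            PySem.List.pyGetD sorted_rows i 0 - PySem.List.pyGetD sorted_rows (i-1) 0 == 1)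
        && sorted_rows.all (fun r => in_bounds r c)
    else false

-- ===== PORT B =====
-- (Source B's in_bounds is the same module-level helper; the port shares `in_bounds` above)
def validate_ship_shape_alt (coords : List (Int × Int)) (size : Int) : Bool :=
  if (coords.length : Int) ≠ size then false
  else if ((PySem.Set.ofList coords).length : Int) ≠ size then false
  else
    let rows := coords.map (fun p => p.1)
    let cols := coords.map (fun p => p.2)
    if (PySem.Set.ofList rows).length == 1 then
      match PySem.List.pyGet? rows 0 with   -- rows[0]; none unreachable (rows ≠ [] here)
      | none => false
      | some r =>
        match PySem.List.min? cols (fun x => x), PySem.List.max? cols (fun x => x) with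
        | some lo, some hi => (hi - lo == size - 1) && in_bounds r lo && in_bounds r hi
        | _, _ => false   -- unreachable: cols ≠ [] here
    else if (PySem.Set.ofList cols).length == 1 then
      match PySem.List.pyGet? cols 0 with
      | none => false
      | some c =>
        match PySem.List.min? rows (fun x => x), PySem.List.max? rows (fun x => x) with
        | some lo, some hi => (hi - lo == size - 1) && in_bounds lo c && in_bounds hi c
        | _, _ => false
    else false

-- ===== PRECONDITION & SPEC =====
def Spec_validate_ship_shape (coords : List (Int × Int)) (size : Int) (out : Bool) : Prop := out = validate_ship_shape_alt coords size
instance (coords : List (Int × Int)) (size : Int) (out : Bool) : Decidable (Spec_validate_ship_shape coords size out) := by unfold Spec_validate_ship_shape; infer_instance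

-- ===== CLAIM (what is proved, stated in full; the proofs are below) =====
def Claim_equal_validate_ship_shape : Prop := ∀ (coords : List (Int × Int)) (size : Int), Dom_validate_ship_shape coords size → Spec_validate_ship_shape coords size (validate_ship_shape coords size)

-- ===== LEMMAS AND PROOFS =====

lemma ofList_sublist {α : Type} [BEq α] [LawfulBEq α] (xs : List α) :
    (PySem.Set.ofList xs).Sublist xs := by
  induction xs with
  | nil => simp [PySem.Set.ofList]
  | cons x t ih =>
    rw [PySem.Set.ofList_cons]
    exact List.Sublist.cons₂ x (((PySem.Set.ofList t).filter_sublist).trans ih)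

lemma nodup_of_ofList_length {α : Type} [BEq α] [LawfulBEq α] (xs : List α)
    (h : (PySem.Set.ofList xs).length = xs.length) : xs.Nodup := by
  have := (ofList_sublist xs).eq_of_length h
  rw [← this]; exact PySem.Set.nodup_ofList xs

lemma const_of_ofList_length_one {α : Type} [BEq α] [LawfulBEq α] (xs : List α)
    (h : (PySem.Set.ofList xs).length = 1) : ∃ v, xs ≠ [] ∧ ∀ y ∈ xs, y = v := by
  rcases hl : PySem.Set.ofList xs with _ | ⟨v, t⟩
  · rw [hl] at h; simp at h
  · rw [hl] at h
    have ht : t = [] := by simpa using h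
    refine ⟨v, ?_, ?_⟩
    · rintro rfl; simp [PySem.Set.ofList] at hl
    · intro y hy
      have : y ∈ PySem.Set.ofList xs := (PySem.Set.mem_ofList xs y).mpr hy
      rw [hl, ht] at this; simpa using this

lemma loopAll_iff (l : List Int) :
    ((PySem.List.pyRange 1 (l.length : Int)).all fun i =>
        PySem.List.pyGetD l i 0 - PySem.List.pyGetD l (i-1) 0 == 1) = true ↔
    List.IsChain (fun a b => b = a + 1) l := by
  rw [List.all_eq_true, List.isChain_iff_getElem]
  constructor
  · intro h k hk
    have hmem : ((k : Int) + 1) ∈ PySem.List.pyRange 1 (l.length : Int) :=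
      PySem.List.mem_pyRange_one.mpr ⟨by omega, by omega⟩
    have := h _ hmem
    rw [PySem.List.pyGetD_eq_getElem _ _ (by omega) (by omega),
        PySem.List.pyGetD_eq_getElem _ _ (by omega) (by omega)] at this
    have h1 : ((k : Int) + 1).toNat = k + 1 := by omega
    have h2 : ((k : Int) + 1 - 1).toNat = k := by omega
    simp only [h1, h2] at this
    have := beq_iff_eq.mp this
    omega
  · intro h i hi
    obtain ⟨hi1, hi2⟩ := PySem.List.mem_pyRange_one.mp hi
    have hk : (i - 1).toNat + 1 < l.length := by omega
    have := h ((i - 1).toNat) hk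
    rw [PySem.List.pyGetD_eq_getElem _ _ (by omega) (by omega),
        PySem.List.pyGetD_eq_getElem _ _ (by omega) (by omega)]
    have h1 : i.toNat = (i - 1).toNat + 1 := by omega
    simp only [h1]
    exact beq_iff_eq.mpr (by omega)

lemma chain_eq_pyRange : ∀ (t : List Int) (x : Int),
    List.IsChain (fun a b => b = a + 1) (x :: t) →
    x :: t = PySem.List.pyRange x (x + ((t.length : Int) + 1)) := by
  intro t
  induction t with
  | nil =>
    intro x _
    simp [PySem.List.pyRange_one_singleton]
  | cons y s ih =>
    intro x h
    rw [List.isChain_cons_cons] at h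
    obtain ⟨hxy, hrest⟩ := h
    have hend : x + ((((y :: s).length : Nat) : Int) + 1) = y + (((s.length : Nat) : Int) + 1) := by
      simp only [List.length_cons]; push_cast; omega
    rw [hend, PySem.List.pyRange_one_cons (by omega), List.cons_eq_cons]
    refine ⟨rfl, ?_⟩
    rw [show x + 1 = y by omega]
    exact ih y hrest

lemma chain_pyRange (a b : Int) :
    List.IsChain (fun p q => q = p + 1) (PySem.List.pyRange a b) := by
  rw [List.isChain_iff_getElem]
  intro i hi
  rw [PySem.List.getElem_pyRange_one, PySem.List.getElem_pyRange_one]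
  push_cast
  omega

lemma branch_eq (f : Int → Bool)
    (hf : ∀ a b y : Int, a ≤ y → y ≤ b → f a = true → f b = true → f y = true)
    (xs : List Int) (size : Int) (hn : xs.Nodup) (hne : xs ≠ []) (hsz : (xs.length : Int) = size) :
    (((PySem.List.pyRange 1 ((PySem.List.sorted xs (fun x => x) false).length : Int)).all
        (fun i => PySem.List.pyGetD (PySem.List.sorted xs (fun x => x) false) i 0 -
                  PySem.List.pyGetD (PySem.List.sorted xs (fun x => x) false) (i-1) 0 == 1))
      && (PySem.List.sorted xs (fun x => x) false).all f)
    = (match PySem.List.min? xs (fun x => x), PySem.List.max? xs (fun x => x) with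
       | some lo, some hi => ((hi - lo == size - 1) && f lo && f hi)
       | _, _ => false) := by
  rcases hmin : PySem.List.min? xs (fun x => x) with _ | lo
  · exact absurd ((PySem.List.min?_eq_none_iff xs _).mp hmin) hne
  rcases hmax : PySem.List.max? xs (fun x => x) with _ | hi
  · exact absurd ((PySem.List.max?_eq_none_iff xs _).mp hmax) hne
  have hmatch : (match (some lo : Option Int), (some hi : Option Int) with
      | some lo, some hi => ((hi - lo == size - 1) && f lo && f hi)
      | _, _ => false) = ((hi - lo == size - 1) && f lo && f hi) := rfl
  rw [hmatch]
  have hperm := PySem.List.sorted_perm xs (fun x => x) false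
  have hmem : ∀ y, y ∈ PySem.List.sorted xs (fun x => x) false ↔ y ∈ xs :=
    fun y => PySem.List.mem_sorted xs _ false y
  have hscn : (PySem.List.sorted xs (fun x => x) false).Nodup := hperm.nodup_iff.mpr hn
  have hpw : (PySem.List.sorted xs (fun x => x) false).Pairwise (· ≤ ·) :=
    PySem.List.sorted_pairwise xs (fun x => x)
  have hlen : (PySem.List.sorted xs (fun x => x) false).length = xs.length := hperm.length_eq
  have hlomin := PySem.List.min?_isMin hmin
  have hhimax := PySem.List.max?_isMax hmax
  have hlomem := PySem.List.min?_mem hmin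
  have hhimem := PySem.List.max?_mem hmax
  by_cases hch : List.IsChain (fun a b => b = a + 1) (PySem.List.sorted xs (fun x => x) false)
  · rw [(loopAll_iff _).mpr hch, Bool.true_and]
    rcases hsc : PySem.List.sorted xs (fun x => x) false with _ | ⟨x, t⟩
    · exact absurd ((PySem.List.sorted_eq_nil_iff xs _ false).mp hsc) hne
    rw [hsc] at hch hmem hscn hlen
    have hrange := chain_eq_pyRange t x hch
    have hxlo : x = lo := by
      have h1 : lo ≤ x := hlomin x ((hmem x).mp (by simp))
      have h2 : x ≤ lo := by
        have : lo ∈ x :: t := (hmem lo).mpr hlomem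
        rw [hrange] at this
        exact (PySem.List.mem_pyRange_one.mp this).1
      omega
    have hhieq : hi = lo + size - 1 := by
      have h1 : hi ∈ x :: t := (hmem hi).mpr hhimem
      rw [hrange] at h1
      have h2 := PySem.List.mem_pyRange_one.mp h1
      have h3 : (x + (t.length : Int)) ∈ PySem.List.pyRange x (x + ((t.length : Int) + 1)) :=
        PySem.List.mem_pyRange_one.mpr ⟨by omega, by omega⟩
      rw [← hrange] at h3
      have h4 := hhimax _ ((hmem _).mp h3)
      simp only at h4
      have h5 : ((x :: t).length : Int) = size := by rw [hlen]; exact hsz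
      simp only [List.length_cons] at h5
      push_cast at h5
      omega
    have hb : (hi - lo == size - 1) = true := beq_iff_eq.mpr (by omega)
    rw [hb, Bool.true_and]
    rw [Bool.eq_iff_iff]
    simp only [List.all_eq_true, Bool.and_eq_true]
    constructor
    · intro h
      exact ⟨h lo ((hmem lo).mpr hlomem), h hi ((hmem hi).mpr hhimem)⟩
    · rintro ⟨hflo, hfhi⟩ y hy
      exact hf lo hi y (hlomin y ((hmem y).mp hy)) (hhimax y ((hmem y).mp hy)) hflo hfhi
  · have hloop : ((PySem.List.pyRange 1 ((PySem.List.sorted xs (fun x => x) false).length : Int)).all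
        (fun i => PySem.List.pyGetD (PySem.List.sorted xs (fun x => x) false) i 0 -
                  PySem.List.pyGetD (PySem.List.sorted xs (fun x => x) false) (i-1) 0 == 1)) = false := by
      rw [Bool.eq_false_iff]
      intro hc
      exact hch ((loopAll_iff _).mp hc)
    rw [hloop, Bool.false_and]
    have hne2 : hi - lo ≠ size - 1 := by
      intro heq
      apply hch
      have hlt : (PySem.List.sorted xs (fun x => x) false).Pairwise (· < ·) :=
        (hpw.and hscn).imp (fun h => lt_of_le_of_ne h.1 h.2)
      have hsubset : (PySem.List.sorted xs (fun x => x) false) ⊆ PySem.List.pyRange lo (hi + 1) := by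
        intro y hy
        exact PySem.List.mem_pyRange_one.mpr
          ⟨hlomin y ((hmem y).mp hy), by have := hhimax y ((hmem y).mp hy); simp only at this; omega⟩
      have hsp := hscn.subperm hsubset
      have hlen2 : (PySem.List.pyRange lo (hi + 1)).length ≤
          (PySem.List.sorted xs (fun x => x) false).length := by
        rw [PySem.List.length_pyRange_one, hlen]
        omega
      have hperm2 := hsp.perm_of_length_le hlen2
      have heqlist : PySem.List.sorted xs (fun x => x) false = PySem.List.pyRange lo (hi + 1) :=
        List.eq_of_perm_of_sorted (fun a b _ _ h1 h2 => le_antisymm h1 h2) hpw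
          ((PySem.List.pairwise_lt_pyRange_one lo (hi + 1)).imp le_of_lt) hperm2
      rw [heqlist]
      exact chain_pyRange lo (hi + 1)
    have hb : (hi - lo == size - 1) = false := by
      rw [beq_eq_false_iff_ne]
      exact hne2
    rw [hb, Bool.false_and, Bool.false_and]

lemma pyGet?_zero_cons {α : Type} (x : α) (t : List α) : PySem.List.pyGet? (x :: t) 0 = some x := by
  simp [PySem.List.pyGet?, PySem.List.pyIdx?]

lemma hf_row (r : Int) : ∀ a b y : Int, a ≤ y → y ≤ b →
    in_bounds r a = true → in_bounds r b = true → in_bounds r y = true := by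
  intro a b y h1 h2 ha hb
  simp [in_bounds] at *
  omega

lemma hf_col (c : Int) : ∀ a b y : Int, a ≤ y → y ≤ b →
    in_bounds a c = true → in_bounds b c = true → in_bounds y c = true := by
  intro a b y h1 h2 ha hb
  simp [in_bounds] at *
  omega

-- ===== VERDICT (by name: the statement is the Claim_ definition above) =====
theorem validate_ship_shape_spec : Claim_equal_validate_ship_shape := by
  intro coords size _
  show validate_ship_shape coords size = validate_ship_shape_alt coords size
  unfold validate_ship_shape validate_ship_shape_alt
  by_cases h1 : (coords.length : Int) ≠ size
  · simp only [if_pos h1]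
  rw [if_neg h1, if_neg h1]
  by_cases h2 : ((PySem.Set.ofList coords).length : Int) ≠ size
  · simp only [if_pos h2]
  rw [if_neg h2, if_neg h2]
  push_neg at h1 h2
  have hnodup : coords.Nodup := by
    apply nodup_of_ofList_length
    omega
  by_cases hr : (PySem.Set.ofList (coords.map (fun p => p.1))).length = 1
  · -- same_row
    obtain ⟨v, hrne, hrconst⟩ := const_of_ofList_length_one _ hr
    rcases hc0 : coords with _ | ⟨p, rest⟩
    · rw [hc0] at hrne; simp at hrne
    subst hc0
    have hcolnd : ((p :: rest).map (fun p => p.2)).Nodup := by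
      apply List.Nodup.map_on _ hnodup
      intro x hx y hy hxy
      have hx1 : x.1 = v := hrconst x.1 (List.mem_map_of_mem hx)
      have hy1 : y.1 = v := hrconst y.1 (List.mem_map_of_mem hy)
      exact Prod.ext (hx1.trans hy1.symm) hxy
    have hsz : ((((p :: rest).map (fun p => p.2)).length : Int)) = size := by
      rw [List.length_map]; exact h1
    have hbr := branch_eq (fun c => in_bounds p.1 c) (hf_row p.1)
      ((p :: rest).map (fun p => p.2)) size hcolnd (by simp) hsz
    simp only [List.map_cons] at hbr hr ⊢
    simpa [in_bounds, hr, pyGet?_zero_cons] using hbr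
  · by_cases hc : (PySem.Set.ofList (coords.map (fun p => p.2))).length = 1
    · -- same_col
      obtain ⟨v, hcne, hcconst⟩ := const_of_ofList_length_one _ hc
      rcases hc0 : coords with _ | ⟨p, rest⟩
      · rw [hc0] at hcne; simp at hcne
      subst hc0
      have hrownd : ((p :: rest).map (fun p => p.1)).Nodup := by
        apply List.Nodup.map_on _ hnodup
        intro x hx y hy hxy
        have hx2 : x.2 = v := hcconst x.2 (List.mem_map_of_mem hx)
        have hy2 : y.2 = v := hcconst y.2 (List.mem_map_of_mem hy)
        exact Prod.ext hxy (hx2.trans hy2.symm)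
      have hsz : ((((p :: rest).map (fun p => p.1)).length : Int)) = size := by
        rw [List.length_map]; exact h1
      have hbc := branch_eq (fun r => in_bounds r p.2) (hf_col p.2)
        ((p :: rest).map (fun p => p.1)) size hrownd (by simp) hsz
      simp only [List.map_cons] at hbc hr hc ⊢
      simpa [in_bounds, hr, hc, pyGet?_zero_cons] using hbc
    · simp [hr, hc]
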